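-- pv_equiv track=rewrite | github.com/quamejnr/Python | Functions/my_algorithms.py | queue_time1
-- ===== SOURCE A (Python) =====
-- def queue_time1(customers, n):
--     """queue time taken for customers to check-out of the supermarket given the number of checkout tills(n)."""
--     if len(customers) != 0:
--         new_lst, b = sorted(customers[:n]), customers[n:]
--         for i in b:
--             new_lst[0] += i
--             new_lst = sorted(new_lst)
--         return new_lst[-1]
--     return 0
-- ===== SOURCE B (Python) =====
-- def _siftdown(h, i):
--     """Restore the min-heap property below index i (array-encoded binary heap)."""
--     m = len(h)
--     while True:
--         l = 2 * i + 1
--         r = 2 * i + 2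
--         s = i
--         if l < m and h[l] < h[s]:
--             s = l
--         if r < m and h[r] < h[s]:
--             s = r
--         if s == i:
--             return
--         h[i], h[s] = h[s], h[i]
--         i = s
--
--
-- def queue_time1(customers, n):
--     """queue time taken for customers to check-out of the supermarket given the number of checkout tills(n)."""
--     if not customers:
--         return 0
--     h = customers[:n]
--     for i in range(len(h) // 2 - 1, -1, -1):   # heapify the initial till loads
--         _siftdown(h, i)
--     for t in customers[n:]:                    # root = least-loaded till; replace and sift down
--         h[0] += t
--         _siftdown(h, 0)
--     return max(h)
-- ===== Notes on version B (the rewrite author's own statement) =====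
-- stated objective: faster
-- what changed: B assigns each customer via an array-encoded binary min-heap of till loads (heapify once, then bump the root and sift down per customer, one final max), instead of A's full re-sort of the load list after every customer.
import Mathlib
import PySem

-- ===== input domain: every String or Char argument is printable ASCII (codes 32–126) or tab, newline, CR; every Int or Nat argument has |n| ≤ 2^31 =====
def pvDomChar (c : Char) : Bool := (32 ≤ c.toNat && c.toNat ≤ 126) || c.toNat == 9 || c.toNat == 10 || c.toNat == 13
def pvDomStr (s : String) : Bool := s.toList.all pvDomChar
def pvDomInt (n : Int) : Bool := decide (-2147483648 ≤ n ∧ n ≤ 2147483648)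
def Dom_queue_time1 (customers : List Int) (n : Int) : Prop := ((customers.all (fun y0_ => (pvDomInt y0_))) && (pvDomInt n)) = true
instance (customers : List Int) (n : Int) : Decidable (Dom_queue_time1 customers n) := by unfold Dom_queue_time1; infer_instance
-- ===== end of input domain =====

-- B replaces A's per-customer full re-sort of the load list by an array-encoded binary min-heap
-- (heapify once, then bump the root and sift down per customer), and one final max.

-- ===== PORT A =====
-- the loop body: new_lst[0] += i; new_lst = sorted(new_lst)
-- (under Pre_ the accumulator is never []; the [] branch is unreachable there)
def stepA (acc : List Int) (i : Int) : List Int :=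
  PySem.List.sorted (match acc with | [] => [] | x :: xs => (x + i) :: xs) (fun x => x) false

def queue_time1 (customers : List Int) (n : Int) : Int :=
  if customers.length ≠ 0 then
    let new_lst := PySem.List.sorted (PySem.List.slice customers none (some n)) (fun x => x) false
    let b := PySem.List.slice customers (some n) none
    let final := b.foldl stepA new_lst
    (PySem.List.pyGet? final (-1)).getD 0   -- new_lst[-1]; under Pre_ the list is nonempty
  else 0

-- ===== PORT B =====
-- the target index s computed by the two 'if's of _siftdown's loop body
def sdChild1 (h : List Int) (i : Nat) : Nat :=
  if 2*i+1 < h.length ∧ h.getD (2*i+1) 0 < h.getD i 0 then 2*i+1 else i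

def sdTarget (h : List Int) (i : Nat) : Nat :=
  if 2*i+2 < h.length ∧ h.getD (2*i+2) 0 < h.getD (sdChild1 h i) 0 then 2*i+2 else sdChild1 h i

theorem sdTarget_gt (h : List Int) (i : Nat) (hs : sdTarget h i ≠ i) :
    i < sdTarget h i ∧ sdTarget h i < h.length := by
  unfold sdTarget sdChild1 at hs ⊢
  split_ifs at hs ⊢ <;> omega

-- the while loop of _siftdown: swap h[i], h[s] and continue at s
def siftdown (h : List Int) (i : Nat) : List Int :=
  let s := sdTarget h i
  if _hs : s = i then h
  else siftdown ((h.set i (h.getD s 0)).set s (h.getD i 0)) s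
termination_by h.length - i
decreasing_by
  have := sdTarget_gt h i _hs
  simp only [List.length_set]
  omega

-- for i in range(len(h)//2 - 1, -1, -1): _siftdown(h, i)    -- counts k-1, k-2, …, 0
def heapifyDown (h : List Int) : Nat → List Int
  | 0 => h
  | k + 1 => heapifyDown (siftdown h k) k

def queue_time1_alt (customers : List Int) (n : Int) : Int :=
  if customers = [] then 0
  else
    let h0 := PySem.List.slice customers none (some n)
    let h1 := heapifyDown h0 (h0.length / 2)
    let final := (PySem.List.slice customers (some n) none).foldl
      (fun h t => siftdown (h.set 0 (h.getD 0 0 + t)) 0) h1   -- h[0] += t; _siftdown(h, 0); under Pre_ h ≠ []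
    (PySem.List.max? final (fun x => x)).getD 0   -- max(h); under Pre_ the list is nonempty

-- ===== PRECONDITION & SPEC =====
-- Pre_ excludes exactly the inputs where Python A raises (IndexError: customers nonempty but
-- customers[:n] empty, i.e. n = 0 or n ≤ -len(customers)); Python B raises there too (IndexError/ValueError).
def Pre_queue_time1 (customers : List Int) (n : Int) : Prop :=
  customers = [] ∨ 1 ≤ n ∨ (n < 0 ∧ 1 ≤ (customers.length : Int) + n)
instance (customers : List Int) (n : Int) : Decidable (Pre_queue_time1 customers n) := by
  unfold Pre_queue_time1; infer_instance
def pvWitness_queue_time1 : List Int × Int := ([5, 3, 7, 2], 2)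

def Spec_queue_time1 (customers : List Int) (n : Int) (out : Int) : Prop := out = queue_time1_alt customers n
instance (customers : List Int) (n : Int) (out : Int) : Decidable (Spec_queue_time1 customers n out) := by unfold Spec_queue_time1; infer_instance

-- ===== CLAIM (what is proved, stated in full; the proofs are below) =====
def Claim_equal_queue_time1 : Prop := ∀ (customers : List Int) (n : Int), Dom_queue_time1 customers n → Pre_queue_time1 customers n → Spec_queue_time1 customers n (queue_time1 customers n)

-- ===== LEMMAS AND PROOFS =====

-- getD through set
theorem getD_set_self (h : List Int) (i : Nat) (v : Int) (hi : i < h.length) :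
    (h.set i v).getD i 0 = v := by
  simp [List.getD_eq_getElem?_getD, hi]

theorem getD_set_ne (h : List Int) (i j : Nat) (v : Int) (hne : i ≠ j) :
    (h.set i v).getD j 0 = h.getD j 0 := by
  simp [List.getD_eq_getElem?_getD, List.getElem?_set_ne hne]

-- the swap is a permutation
theorem cons_set_perm : ∀ (xs : List Int) (j : Nat) (x : Int), j < xs.length →
    (xs.getD j 0 :: xs.set j x).Perm (x :: xs)
  | [], j, x, hj => by simp at hj
  | y :: ys, 0, x, _ => by
    simpa using List.Perm.swap x y ys
  | y :: ys, j + 1, x, hj => by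
    have ih := cons_set_perm ys j x (by simpa using hj)
    simp only [List.getD_cons_succ, List.set_cons_succ]
    refine List.Perm.trans (List.Perm.swap _ _ _) ?_
    refine List.Perm.trans (List.Perm.cons y ih) ?_
    exact List.Perm.swap _ _ _

theorem swap_perm : ∀ (h : List Int) (i s : Nat), i < h.length → s < h.length →
    ((h.set i (h.getD s 0)).set s (h.getD i 0)).Perm h
  | [], i, s, hi, _ => by simp at hi
  | x :: xs, 0, 0, _, _ => by simp
  | x :: xs, 0, j+1, _, hs => by
    simpa using cons_set_perm xs j x (by simpa using hs)
  | x :: xs, k+1, 0, hi, _ => by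
    simpa using cons_set_perm xs k x (by simpa using hi)
  | x :: xs, k+1, j+1, hi, hs => by
    simpa using List.Perm.cons x (swap_perm xs k j (by simpa using hi) (by simpa using hs))

theorem length_siftdown (h : List Int) (i : Nat) : (siftdown h i).length = h.length := by
  induction h, i using siftdown.induct with
  | case1 h i s hs => rw [siftdown, dif_pos (show sdTarget h i = i from hs)]
  | case2 h i s hs ih => rw [siftdown, dif_neg (show ¬ sdTarget h i = i from hs), ih]; simp

theorem perm_siftdown (h : List Int) (i : Nat) : (siftdown h i).Perm h := by
  induction h, i using siftdown.induct with
  | case1 h i s hs => rw [siftdown, dif_pos (show sdTarget h i = i from hs)]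
  | case2 h i s' hs ih =>
    rw [siftdown, dif_neg (show ¬ sdTarget h i = i from hs)]
    have hgt := sdTarget_gt h i (show sdTarget h i ≠ i from hs)
    exact ih.trans (swap_perm h i (sdTarget h i) (lt_trans hgt.1 hgt.2) hgt.2)

-- heap machinery
def par (j : Nat) : Nat := (j - 1) / 2

def HeapBelow (h : List Int) (k : Nat) : Prop :=
  ∀ j, j < h.length → 0 < j → k ≤ par j → h.getD (par j) 0 ≤ h.getD j 0

theorem children_of_par (i j : Nat) (hj : 0 < j) (hp : par j = i) : j = 2*i+1 ∨ j = 2*i+2 := by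
  unfold par at hp; omega

theorem par_children (i : Nat) : par (2*i+1) = i ∧ par (2*i+2) = i := by
  unfold par; omega

theorem sdTarget_spec (h : List Int) (i : Nat) :
    h.getD (sdTarget h i) 0 ≤ h.getD i 0 ∧
    (2*i+1 < h.length → h.getD (sdTarget h i) 0 ≤ h.getD (2*i+1) 0) ∧
    (2*i+2 < h.length → h.getD (sdTarget h i) 0 ≤ h.getD (2*i+2) 0) ∧
    (sdTarget h i = i ∨ sdTarget h i = 2*i+1 ∨ sdTarget h i = 2*i+2) := by
  unfold sdTarget sdChild1
  split_ifs <;> refine ⟨?_, ?_, ?_, ?_⟩ <;> omega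

theorem siftdown_heap (h : List Int) (i : Nat) (k : Nat) (hk : k ≤ i)
    (h1 : ∀ j, j < h.length → 0 < j → k ≤ par j → par j ≠ i → h.getD (par j) 0 ≤ h.getD j 0)
    (h2 : ∀ j, j < h.length → par j = i → 0 < i → k ≤ par i → h.getD (par i) 0 ≤ h.getD j 0) :
    HeapBelow (siftdown h i) k := by
  induction h, i using siftdown.induct generalizing k with
  | case1 h i s hs =>
    have hsi : sdTarget h i = i := hs
    rw [siftdown, dif_pos hsi]
    intro j hj hj0 hkp
    by_cases hpi : par j = i
    · have hspec := sdTarget_spec h i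
      rw [hsi] at hspec
      rcases children_of_par i j hj0 hpi with rfl | rfl
      · rw [hpi]; exact hspec.2.1 hj
      · rw [hpi]; exact hspec.2.2.1 hj
    · exact h1 j hj hj0 hkp hpi
  | case2 h i s hs ih =>
    have hs2 : sdTarget h i ≠ i := hs
    have hseq : sdTarget h i = s := rfl
    have hgt := sdTarget_gt h i hs2
    have hspec := sdTarget_spec h i
    rw [siftdown, dif_neg hs2, hseq]
    rw [hseq] at hgt hspec
    have hsne : s ≠ i := hseq ▸ hs2
    clear_value s
    have hi : i < h.length := lt_trans hgt.1 hgt.2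
    have hlen : ((h.set i (h.getD s 0)).set s (h.getD i 0)).length = h.length := by simp
    have hine : i ≠ s := fun he => hsne he.symm
    have gi : ((h.set i (h.getD s 0)).set s (h.getD i 0)).getD i 0 = h.getD s 0 := by
      rw [getD_set_ne _ _ _ _ (Ne.symm hine), getD_set_self _ _ _ hi]
    have gs : ((h.set i (h.getD s 0)).set s (h.getD i 0)).getD s 0 = h.getD i 0 := by
      rw [getD_set_self]; simpa using hgt.2
    have go : ∀ x, x ≠ i → x ≠ s → ((h.set i (h.getD s 0)).set s (h.getD i 0)).getD x 0 = h.getD x 0 := by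
      intro x hxi hxs
      rw [getD_set_ne _ _ _ _ (Ne.symm hxs), getD_set_ne _ _ _ _ (Ne.symm hxi)]
    have hpars : par s = i := by
      rcases hspec.2.2.2 with he | rfl | rfl
      · exact absurd he hsne
      · exact (par_children i).1
      · exact (par_children i).2
    refine ih k (le_of_lt (lt_of_le_of_lt hk hgt.1)) ?_ ?_
    · -- premise 1 for the swapped list at s
      intro j hj hj0 hkp hps
      rw [hlen] at hj
      by_cases hpi : par j = i
      · by_cases hjs : j = s
        · subst hjs
          rw [hpi, gi, gs]
          exact hspec.1
        · have hjne : j ≠ i := by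
            rcases children_of_par i j hj0 hpi with rfl | rfl <;> omega
          rw [hpi, gi, go j hjne hjs]
          rcases children_of_par i j hj0 hpi with rfl | rfl
          · exact hspec.2.1 hj
          · exact hspec.2.2.1 hj
      · by_cases hji : j = i
        · subst hji
          have hpj_lt : par j < j := by unfold par; omega
          rw [go (par j) (by omega) (by omega), gi]
          exact h2 s hgt.2 hpars hj0 (by omega)
        · have hjs : j ≠ s := fun he => hpi (he ▸ hpars)
          rw [go (par j) hpi hps, go j hji hjs]
          exact h1 j hj hj0 hkp hpi
    · -- premise 2 for the swapped list at s
      intro j hj hpj hs0 hkps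
      rw [hlen] at hj
      have hj0 : 0 < j := by
        have hp2 := hpj; unfold par at hp2; omega
      have hjgt : s < j := by
        rcases children_of_par s j hj0 hpj with rfl | rfl <;> omega
      rw [hpars, gi, go j (by omega) (by omega)]
      have hres := h1 j hj hj0 (by rw [hpj]; omega) (by rw [hpj]; omega)
      rw [hpj] at hres
      exact hres

theorem heapifyDown_heap (h : List Int) (k : Nat) (hb : HeapBelow h k) :
    HeapBelow (heapifyDown h k) 0 := by
  induction k generalizing h with
  | zero => exact hb
  | succ k ih =>
    refine ih (siftdown h k) ?_
    refine siftdown_heap h k k (le_refl k) ?_ ?_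
    · intro j hj hj0 hkp hpk
      exact hb j hj hj0 (by omega)
    · intro j hj hpj hk0 hkk
      exfalso; unfold par at hkk; omega

theorem length_heapifyDown (h : List Int) (k : Nat) : (heapifyDown h k).length = h.length := by
  induction k generalizing h with
  | zero => rfl
  | succ k ih => simpa [heapifyDown, ih] using (length_siftdown h k)

theorem perm_heapifyDown (h : List Int) (k : Nat) : (heapifyDown h k).Perm h := by
  induction k generalizing h with
  | zero => exact List.Perm.refl h
  | succ k ih => exact (ih (siftdown h k)).trans (perm_siftdown h k)

theorem heapBelow_init (h : List Int) : HeapBelow h (h.length / 2) := by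
  intro j hj hj0 hk
  exfalso
  unfold par at hk
  omega

theorem isHeap_root_min (h : List Int) (hh : HeapBelow h 0) :
    ∀ j, j < h.length → h.getD 0 0 ≤ h.getD j 0 := by
  intro j
  induction j using Nat.strong_induction_on with
  | _ j ih =>
    intro hj
    rcases Nat.eq_zero_or_pos j with rfl | hj0
    · exact le_refl _
    · have hpj : par j < j := by unfold par; omega
      exact le_trans (ih (par j) hpj (lt_trans hpj hj)) (hh j hj hj0 (Nat.zero_le _))

-- A-side facts (sorted lists)
theorem pairwise_le_getLast : ∀ (xs : List Int) (hne : xs ≠ []),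
    xs.Pairwise (· ≤ ·) → ∀ y ∈ xs, y ≤ xs.getLast hne
  | [], hne, _, _, _ => by simp at hne
  | [x], _, _, y, hy => by simp_all
  | x :: a :: b, _, hp, y, hy => by
    rw [List.getLast_cons (by simp)]
    rcases List.mem_cons.mp hy with rfl | hyt
    · exact (List.pairwise_cons.mp hp).1 _ (List.getLast_mem _)
    · exact pairwise_le_getLast (a :: b) (by simp) (List.pairwise_cons.mp hp).2 y hyt

-- A's new_lst[-1] on an ascending list is the max of any permutation of it
theorem last_eq_max (a b : List Int) (hp : b.Perm a) (ha : a.Pairwise (· ≤ ·)) (hne : a ≠ []) :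
    (PySem.List.pyGet? a (-1)).getD 0 = (PySem.List.max? b (fun x => x)).getD 0 := by
  rw [PySem.List.pyGet?_neg_one, List.getLast?_eq_some_getLast hne]
  cases hmx : PySem.List.max? b (fun x => x) with
  | none =>
    exfalso
    have hbnil : b = [] := (PySem.List.max?_eq_none_iff b (fun x => x)).mp hmx
    subst hbnil
    exact hne (List.Perm.nil_eq hp).symm
  | some mx =>
    simp only [Option.getD_some]
    have hmxa : mx ∈ a := hp.mem_iff.mp (PySem.List.max?_mem hmx)
    have hmax : ∀ y ∈ a, y ≤ mx := by
      intro y hy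
      have := PySem.List.max?_isMax hmx y (hp.mem_iff.mpr hy)
      simpa using this
    exact le_antisymm (hmax _ (List.getLast_mem hne)) (pairwise_le_getLast a hne ha mx hmxa)

theorem stepA_pairwise (a : List Int) (t : Int) : (stepA a t).Pairwise (· ≤ ·) := by
  simpa using PySem.List.sorted_pairwise (α := Int)
    (match a with | [] => [] | x :: xs => (x + t) :: xs) (fun x => x)

theorem foldl_stepA_pairwise (b : List Int) (a : List Int) (ha : a.Pairwise (· ≤ ·)) :
    (b.foldl stepA a).Pairwise (· ≤ ·) := by
  induction b generalizing a with
  | nil => exact ha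
  | cons t ts ih => exact ih (stepA a t) (stepA_pairwise a t)

theorem length_bstep (h : List Int) (t : Int) :
    (siftdown (h.set 0 (h.getD 0 0 + t)) 0).length = h.length := by
  rw [length_siftdown]; simp

theorem length_foldl_bstep (b : List Int) (h : List Int) :
    (b.foldl (fun h t => siftdown (h.set 0 (h.getD 0 0 + t)) 0) h).length = h.length := by
  induction b generalizing h with
  | nil => rfl
  | cons t ts ih => rw [List.foldl_cons, ih, length_bstep]

-- the loop invariant: B's heap is a permutation of A's sorted accumulator and is a heap
theorem fold_inv (b : List Int) (h a : List Int)
    (hperm : h.Perm a) (hheap : HeapBelow h 0) (hne : h ≠ [])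
    (hsort : a.Pairwise (· ≤ ·)) :
    (b.foldl (fun h t => siftdown (h.set 0 (h.getD 0 0 + t)) 0) h).Perm
      (b.foldl stepA a) := by
  induction b generalizing h a with
  | nil => exact hperm
  | cons t ts ih =>
    obtain ⟨hh, ht, rfl⟩ : ∃ hh ht, h = hh :: ht := by
      cases h with
      | nil => exact absurd rfl hne
      | cons x xs => exact ⟨x, xs, rfl⟩
    obtain ⟨a0, at_, rfl⟩ : ∃ a0 at_, a = a0 :: at_ := by
      cases a with
      | nil => exact absurd (List.Perm.nil_eq hperm.symm).symm hne
      | cons x xs => exact ⟨x, xs, rfl⟩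
    -- the heap root equals the head of the ascending list: both are the minimum of the multiset
    have hmin_h : ∀ y ∈ hh :: ht, hh ≤ y := by
      intro y hy
      obtain ⟨j, hj, rfl⟩ := List.getElem_of_mem hy
      have := isHeap_root_min (hh :: ht) hheap j hj
      simpa [List.getD_eq_getElem?_getD, List.getElem?_eq_getElem hj] using this
    have hmin_a : ∀ y ∈ a0 :: at_, a0 ≤ y := by
      intro y hy
      rcases List.mem_cons.mp hy with rfl | hyt
      · exact le_refl y
      · exact (List.pairwise_cons.mp hsort).1 y hyt
    have hroot : hh = a0 :=
      le_antisymm (hmin_h a0 (hperm.mem_iff.mpr List.mem_cons_self))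
        (hmin_a hh (hperm.mem_iff.mp List.mem_cons_self))
    have htail : ht.Perm at_ := (List.perm_cons a0).mp (hroot ▸ hperm)
    have hset : (hh :: ht).set 0 ((hh :: ht).getD 0 0 + t) = (hh + t) :: ht := by simp
    have hstepA : stepA (a0 :: at_) t = PySem.List.sorted ((a0 + t) :: at_) (fun x => x) false := rfl
    simp only [List.foldl_cons]
    refine ih _ _ ?_ ?_ ?_ ?_
    · -- permutation is preserved by the step
      rw [hset, hstepA]
      refine (perm_siftdown _ 0).trans ?_
      refine List.Perm.trans ?_ (PySem.List.sorted_perm _ _ _).symm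
      rw [hroot]
      exact List.Perm.cons _ htail
    · -- the sifted-down heap is again a heap
      refine siftdown_heap _ 0 0 (le_refl 0) ?_ ?_
      · intro j hj hj0 _ hp0
        have hpge : 0 < par j := Nat.pos_of_ne_zero hp0
        have hjge : 3 ≤ j := by have h3 := hpge; unfold par at h3; omega
        rw [hset] at hj ⊢
        simp only [List.length_cons] at hj
        have e1 : ((hh + t) :: ht).getD (par j) 0 = (hh :: ht).getD (par j) 0 := by
          cases hp : par j with
          | zero => omega
          | succ p => simp
        have e2 : ((hh + t) :: ht).getD j 0 = (hh :: ht).getD j 0 := by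
          cases j with
          | zero => omega
          | succ p => simp
        rw [e1, e2]
        exact hheap j (by simpa using hj) hj0 (Nat.zero_le _)
      · intro j hj hpj h00 _
        exact absurd h00 (lt_irrefl 0)
    · -- nonempty is preserved
      intro hnil
      have := length_bstep (hh :: ht) t
      rw [hnil] at this
      simp at this
    · exact stepA_pairwise (a0 :: at_) t

-- under Pre_ (customers nonempty case) customers[:n] is nonempty
theorem slice_to_ne_nil (customers : List Int) (n : Int)
    (hc : customers ≠ []) (hn : 1 ≤ n ∨ (n < 0 ∧ 1 ≤ (customers.length : Int) + n)) :
    PySem.List.slice customers none (some n) ≠ [] := by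
  rcases hn with hn | ⟨hn, hlen⟩
  · rw [PySem.List.slice_to customers (by omega)]
    have : 1 ≤ n.toNat := by omega
    intro hnil
    have := congrArg List.length hnil
    simp at this
    rcases this with h1 | h1
    · omega
    · exact hc h1
  · have hk : n = -((-n).toNat : Int) := by omega
    rw [hk, PySem.List.slice_to_neg_natCast customers (-n).toNat (by omega)]
    intro hnil
    have := congrArg List.length hnil
    simp at this
    omega

-- ===== VERDICT (by name: the statement is the Claim_ definition above) =====
theorem queue_time1_spec : Claim_equal_queue_time1 := by
  intro customers n _ hpre
  unfold Spec_queue_time1 queue_time1 queue_time1_alt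
  by_cases hc : customers = []
  · simp [hc]
  · have hpre' : 1 ≤ n ∨ (n < 0 ∧ 1 ≤ (customers.length : Int) + n) := by
      rcases hpre with h | h | h
      · exact absurd h hc
      · exact Or.inl h
      · exact Or.inr h
    have hloads := slice_to_ne_nil customers n hc hpre'
    have hlen : customers.length ≠ 0 := fun h0 => hc (List.length_eq_zero_iff.mp h0)
    rw [if_pos hlen, if_neg hc]
    show (PySem.List.pyGet? (List.foldl stepA
            (PySem.List.sorted (PySem.List.slice customers none (some n)) (fun x => x) false)
            (PySem.List.slice customers (some n) none)) (-1)).getD 0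
        = (PySem.List.max? (List.foldl (fun h t => siftdown (h.set 0 (h.getD 0 0 + t)) 0)
            (heapifyDown (PySem.List.slice customers none (some n))
              ((PySem.List.slice customers none (some n)).length / 2))
            (PySem.List.slice customers (some n) none)) (fun x => x)).getD 0
    set loads := PySem.List.slice customers none (some n) with hloaddef
    set tl := PySem.List.slice customers (some n) none with htldef
    set h1 := heapifyDown loads (loads.length / 2) with h1def
    have h1len : h1.length = loads.length := length_heapifyDown loads _
    have h1ne : h1 ≠ [] := by
      intro hnil
      rw [hnil] at h1len
      exact hloads (List.length_eq_zero_iff.mp h1len.symm)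
    have hperm0 : h1.Perm (PySem.List.sorted loads (fun x => x) false) :=
      (perm_heapifyDown loads _).trans (PySem.List.sorted_perm loads (fun x => x) false).symm
    have hheap : HeapBelow h1 0 := heapifyDown_heap loads _ (heapBelow_init loads)
    have hsortpw : (PySem.List.sorted loads (fun x => x) false).Pairwise (· ≤ ·) := by
      simpa using PySem.List.sorted_pairwise loads (fun x => x)
    have hfold := fold_inv tl h1 (PySem.List.sorted loads (fun x => x) false) hperm0 hheap h1ne hsortpw
    have hApw := foldl_stepA_pairwise tl _ hsortpw
    have hAne : List.foldl stepA (PySem.List.sorted loads (fun x => x) false) tl ≠ [] := by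
      intro hnil
      rw [hnil] at hfold
      have hBnil := List.Perm.eq_nil hfold
      have := length_foldl_bstep tl h1
      rw [hBnil] at this
      simp at this
      exact h1ne (List.length_eq_zero_iff.mp this.symm)
    exact last_eq_max _ _ hfold hApw hAne
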